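-- pv_equiv track=rewrite | github.com/igorsubbotin/leetcode_python | problem_010.py | packPattern
-- ===== SOURCE A (Python) =====
-- def packPattern(pattern):
--     prev = ("", False)
--     res = []
--     for item in pattern:
--         if item == prev and item[1]:
--             continue
--         prev = item
--         res.append(item)
--     return res
-- ===== SOURCE B (Python) =====
-- from itertools import groupby
--
-- def packPattern(pattern):
--     res = []
--     for _, grp in groupby(pattern):
--         g = list(grp)
--         if len(g) > 1 and g[0][1]:
--             res.append(g[0])
--         else:
--             res.extend(g)
--     return res
-- ===== Notes on version B (the rewrite author's own statement) =====
-- stated objective: idiomatic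
-- what changed: Replaces the prev-tracking single pass by an itertools.groupby grouped traversal: each maximal run of equal consecutive items is kept whole when its flag is false and collapsed to its first element when it has length > 1 and a true flag.
import Mathlib
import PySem

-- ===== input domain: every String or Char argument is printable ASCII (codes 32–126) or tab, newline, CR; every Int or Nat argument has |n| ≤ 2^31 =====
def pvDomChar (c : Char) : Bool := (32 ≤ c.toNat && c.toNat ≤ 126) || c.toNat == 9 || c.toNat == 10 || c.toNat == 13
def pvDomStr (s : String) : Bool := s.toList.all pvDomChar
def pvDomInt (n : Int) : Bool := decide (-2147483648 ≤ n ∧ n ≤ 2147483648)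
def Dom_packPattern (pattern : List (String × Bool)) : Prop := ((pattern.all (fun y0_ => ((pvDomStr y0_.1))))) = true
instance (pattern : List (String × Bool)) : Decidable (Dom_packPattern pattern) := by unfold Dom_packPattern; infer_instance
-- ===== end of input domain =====

-- ===== PORT A =====
-- B rewrites the prev-tracking single pass as an itertools.groupby grouped traversal (same cost, more idiomatic).
def packPattern (pattern : List (String × Bool)) : List (String × Bool) :=
  (pattern.foldl
    (fun (st : (String × Bool) × List (String × Bool)) item =>
      if item = st.1 ∧ item.2 then st
      else (item, st.2 ++ [item]))
    (("", false), [])).2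

-- ===== PORT B =====
-- itertools.groupby: maximal runs of equal consecutive items
def pvGroups : List (String × Bool) → List (List (String × Bool))
  | [] => []
  | x :: xs =>
    (x :: xs.takeWhile (· == x)) :: pvGroups (xs.dropWhile (· == x))
termination_by l => l.length
decreasing_by
  simp only [List.length_cons]
  exact Nat.lt_succ_of_le (List.length_dropWhile_le _ _)

def packPattern_alt (pattern : List (String × Bool)) : List (String × Bool) :=
  (pvGroups pattern).foldl
    (fun res g =>
      if 1 < g.length ∧ (g.headD ("", false)).2 then res ++ [g.headD ("", false)]
      else res ++ g)
    []

-- ===== PRECONDITION & SPEC =====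
def Spec_packPattern (pattern : List (String × Bool)) (out : List (String × Bool)) : Prop := out = packPattern_alt pattern
instance (pattern : List (String × Bool)) (out : List (String × Bool)) : Decidable (Spec_packPattern pattern out) := by unfold Spec_packPattern; infer_instance

-- ===== CLAIM (what is proved, stated in full; the proofs are below) =====
def Claim_equal_packPattern : Prop := ∀ (pattern : List (String × Bool)), Dom_packPattern pattern → Spec_packPattern pattern (packPattern pattern)

-- ===== LEMMAS AND PROOFS =====

-- the recursive characterisation of A's pass
def pvF (p : String × Bool) : List (String × Bool) → List (String × Bool)
  | [] => []
  | x :: xs => if x = p ∧ x.2 then pvF p xs else x :: pvF x xs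

theorem foldA_eq (l : List (String × Bool)) : ∀ (p : String × Bool) (res : List (String × Bool)),
    (l.foldl (fun (st : (String × Bool) × List (String × Bool)) item =>
      if item = st.1 ∧ item.2 then st else (item, st.2 ++ [item])) (p, res)).2
    = res ++ pvF p l := by
  induction l with
  | nil => intro p res; simp [pvF]
  | cons x xs ih =>
    intro p res
    simp only [List.foldl, pvF]
    by_cases h : x = p ∧ x.2 = true
    · rw [if_pos h, if_pos h, ih]
    · rw [if_neg h, if_neg h, ih]
      simp

theorem foldB_eq (gs : List (List (String × Bool))) : ∀ (res : List (String × Bool)),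
    gs.foldl (fun res g =>
      if 1 < g.length ∧ (g.headD ("", false)).2 then res ++ [g.headD ("", false)]
      else res ++ g) res
    = res ++ gs.flatMap (fun g =>
        if 1 < g.length ∧ (g.headD ("", false)).2 then [g.headD ("", false)] else g) := by
  induction gs with
  | nil => intro res; simp
  | cons g gs ih =>
    intro res
    simp only [List.foldl, List.flatMap_cons]
    by_cases h : 1 < g.length ∧ (g.headD ("", false)).2 = true
    · rw [if_pos h, if_pos h, ih]
      simp
    · rw [if_neg h, if_neg h, ih]
      simp

theorem pvF_run (x : String × Bool) (g rest : List (String × Bool))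
    (hg : ∀ y ∈ g, y = x) :
    pvF x (g ++ rest) = (if x.2 then [] else g) ++ pvF x rest := by
  induction g with
  | nil => simp
  | cons y t ih =>
    have hy : y = x := hg y (by simp)
    subst hy
    by_cases hx : y.2
    · simp [pvF, hx, ih (fun z hz => hg z (by simp [hz]))]
    · simp [pvF, hx, ih (fun z hz => hg z (by simp [hz]))]

theorem pvF_eq_flatMap (n : Nat) : ∀ (l : List (String × Bool)), l.length ≤ n →
    ∀ (p : String × Bool), (∀ x, l.head? = some x → x = p → x.2 = false) →
    pvF p l = (pvGroups l).flatMap (fun g =>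
      if 1 < g.length ∧ (g.headD ("", false)).2 then [g.headD ("", false)] else g) := by
  induction n with
  | zero =>
    intro l hl p _
    have : l = [] := List.eq_nil_of_length_eq_zero (Nat.le_zero.mp hl)
    subst this; simp [pvF, pvGroups]
  | succ n ih =>
    intro l hl p hp
    cases l with
    | nil => simp [pvF, pvGroups]
    | cons x xs =>
      have hguard : ¬ (x = p ∧ x.2) := by
        rintro ⟨h1, h2⟩
        have := hp x rfl h1
        simp [this] at h2
      have htw : ∀ y ∈ xs.takeWhile (· == x), y = x := by
        intro y hy
        have := List.mem_takeWhile_imp hy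
        exact eq_of_beq this
      have hsplit : xs = xs.takeWhile (· == x) ++ xs.dropWhile (· == x) :=
        (List.takeWhile_append_dropWhile).symm
      have hlen : (xs.dropWhile (· == x)).length ≤ n := by
        have h1 : (xs.dropWhile (· == x)).length ≤ xs.length := List.length_dropWhile_le _ _
        have h2 : xs.length ≤ n := by simpa using Nat.le_of_succ_le_succ hl
        omega
      have hhead : ∀ z, (xs.dropWhile (· == x)).head? = some z → z = x → z.2 = false := by
        intro z hz hzx
        exfalso
        have := List.head?_dropWhile_not (· == x) xs
        rw [hz] at this
        simp [hzx] at this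
      have hF : pvF p (x :: xs) = x :: pvF x xs := by
        simp [pvF, hguard]
      rw [hF]
      conv_lhs => rw [hsplit]
      rw [pvF_run x _ _ htw, ih _ hlen x hhead]
      rw [pvGroups]
      simp only [List.flatMap_cons]
      by_cases hx : x.2
      · by_cases hone : xs.takeWhile (· == x) = []
        · simp [hone, hx]
        · have hpos : 0 < (xs.takeWhile (· == x)).length :=
            List.length_pos_iff.mpr hone
          simp [hx, hpos]
      · simp [hx]

theorem pvF_eq_B (l : List (String × Bool)) :
    pvF ("", false) l = (pvGroups l).flatMap (fun g =>
      if 1 < g.length ∧ (g.headD ("", false)).2 then [g.headD ("", false)] else g) := by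
  apply pvF_eq_flatMap l.length l (Nat.le_refl _)
  intro x _ hx
  rw [hx]

-- ===== VERDICT (by name: the statement is the Claim_ definition above) =====
theorem packPattern_spec : Claim_equal_packPattern := by
  intro pattern _
  unfold Spec_packPattern packPattern packPattern_alt
  rw [foldA_eq, foldB_eq, pvF_eq_B]
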